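-- pv_equiv track=rewrite | github.com/daniel-reich/ubiquitous-fiesta | 6brSyFwWnb9Msu7kX_9.py | pos_neg_sort
-- ===== SOURCE A (Python) =====
-- def pos_neg_sort(lst):
--   new = []
--   negativeIndex = {}
--   for i,j in enumerate(lst):
--     if j > 0:
--       new.append(j)
--       new.sort()
--     else:
--       negativeIndex[i] = j
--   for key, value in negativeIndex.items():
--     new.insert(key, value)
--   return new
-- ===== SOURCE B (Python) =====
-- def pos_neg_sort(lst):
--   # sort positives once, then one pass placing non-positives at their original indices
--   pos = iter(sorted(x for x in lst if x > 0))
--   return [next(pos) if x > 0 else x for x in lst]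
-- ===== Notes on version B (the rewrite author's own statement) =====
-- stated objective: faster
-- what changed: A re-sorts the growing positives list after every append and then repeatedly list.insert's non-positives at their original indices; B sorts the positives once and makes a single pass over the input, emitting the next sorted positive or the original non-positive.
import Mathlib
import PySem

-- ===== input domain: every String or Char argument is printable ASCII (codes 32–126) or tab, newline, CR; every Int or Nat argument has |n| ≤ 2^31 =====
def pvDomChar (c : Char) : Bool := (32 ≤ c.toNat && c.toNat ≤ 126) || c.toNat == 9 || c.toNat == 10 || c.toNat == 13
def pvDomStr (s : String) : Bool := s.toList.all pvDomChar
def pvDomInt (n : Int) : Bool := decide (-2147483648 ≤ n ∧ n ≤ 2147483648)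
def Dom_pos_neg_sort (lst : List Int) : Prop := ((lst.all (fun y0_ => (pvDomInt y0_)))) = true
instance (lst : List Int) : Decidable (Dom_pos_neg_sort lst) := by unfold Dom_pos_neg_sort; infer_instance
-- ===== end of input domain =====

-- B sorts the positives once and fills them into one left-to-right pass (A re-sorts after
-- every append and re-inserts each non-positive); same return value, B is asymptotically faster.

-- ===== PORT A =====
-- loop body of A's first for-loop: append-and-sort positives, record non-positives by index
def stepA (st : List Int × PySem.Dict Int Int) (p : Int × Int) : List Int × PySem.Dict Int Int :=
  if p.2 > 0 then (PySem.List.sorted (st.1 ++ [p.2]) (fun x => x) false, st.2)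
  else (st.1, st.2.insert p.1 p.2)

def pos_neg_sort (lst : List Int) : List Int :=
  let st := (PySem.List.enumerate lst 0).foldl stepA ([], PySem.Dict.empty)
  st.2.items.foldl (fun new kv => PySem.List.insert new kv.1 kv.2) st.1

-- ===== PORT B =====
-- the list comprehension: next sorted positive for a positive slot, the element itself otherwise
def altFill : List Int → List Int → List Int
  | [], _ => []
  | x :: xs, ps =>
    if x > 0 then
      match ps with
      | p :: ps' => p :: altFill xs ps'
      | [] => []        -- next() on an exhausted iterator; unreachable when ps holds all positives
    else x :: altFill xs ps

def pos_neg_sort_alt (lst : List Int) : List Int :=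
  altFill lst (PySem.List.sorted (lst.filter (fun x => decide (x > 0))) (fun x => x) false)

-- ===== PRECONDITION & SPEC =====
def Spec_pos_neg_sort (lst : List Int) (out : List Int) : Prop := out = pos_neg_sort_alt lst
instance (lst : List Int) (out : List Int) : Decidable (Spec_pos_neg_sort lst out) := by unfold Spec_pos_neg_sort; infer_instance

-- ===== CLAIM (what is proved, stated in full; the proofs are below) =====
def Claim_equal_pos_neg_sort : Prop := ∀ (lst : List Int), Dom_pos_neg_sort lst → Spec_pos_neg_sort lst (pos_neg_sort lst)

-- ===== LEMMAS AND PROOFS =====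

-- the (index, value) pairs A's dict holds after the first loop, indices starting at k
def pairsNP : List Int → Int → List (Int × Int)
  | [], _ => []
  | x :: xs, k => if x > 0 then pairsNP xs (k + 1) else (k, x) :: pairsNP xs (k + 1)

-- A's dict after the first loop, as a recursion over the list
def dictNP : List Int → Int → PySem.Dict Int Int → PySem.Dict Int Int
  | [], _, d => d
  | x :: xs, k, d => if x > 0 then dictNP xs (k + 1) d else dictNP xs (k + 1) (d.insert k x)

lemma phase1 (xs : List Int) : ∀ (k : Int) (pos : List Int) (d : PySem.Dict Int Int),
    (PySem.List.enumerate xs k).foldl stepA (PySem.List.sorted pos (fun x => x) false, d)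
      = (PySem.List.sorted (pos ++ xs.filter (fun x => decide (x > 0))) (fun x => x) false,
         dictNP xs k d) := by
  induction xs with
  | nil => intro k pos d; simp [PySem.List.enumerate_nil, dictNP]
  | cons x xs ih =>
    intro k pos d
    rw [PySem.List.enumerate_cons]
    by_cases hx : x > 0
    · have hsort : PySem.List.sorted (PySem.List.sorted pos (fun x => x) false ++ [x]) (fun x => x) false
          = PySem.List.sorted (pos ++ [x]) (fun x => x) false := by
        refine PySem.List.sorted_eq_sorted_of_perm _ _ _ (fun a b h => h) ?_
        exact (PySem.List.sorted_perm pos (fun x => x) false).append_right [x]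
      simp only [List.foldl_cons, stepA, hx, if_pos, List.filter_cons, dictNP]
      simp only [hsort, ih (k + 1) (pos ++ [x]) d]
      simp [List.append_assoc]
    · simp only [List.foldl_cons, stepA, hx, if_false, List.filter_cons,dictNP,
        ih (k + 1) pos (d.insert k x)]
      simp

lemma items_dictNP (xs : List Int) : ∀ (k : Int) (d : PySem.Dict Int Int),
    (∀ j ∈ d.keys, j < k) → (dictNP xs k d).items = d.items ++ pairsNP xs k := by
  induction xs with
  | nil => intro k d _; simp [dictNP, pairsNP]
  | cons x xs ih =>
    intro k d hk
    by_cases hx : x > 0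
    · simp only [dictNP, pairsNP, hx, if_pos]
      exact ih (k + 1) d (fun j hj => lt_trans (hk j hj) (by omega))
    · simp only [dictNP, pairsNP, hx, if_false]
      have hnc : d.contains k = false := by
        rw [PySem.Dict.contains_eq_decide_mem_keys]
        simp only [decide_eq_false_iff_not]
        intro hmem; exact absurd (hk k hmem) (lt_irrefl k)
      rw [ih (k + 1) (d.insert k x) ?_, PySem.Dict.items_insert_of_not_contains _ _ hnc,
        List.append_assoc]
      · simp
      · intro j hj
        rcases (PySem.Dict.mem_keys_insert d k j x).1 hj with h | h
        · omega
        · have := hk j h; omega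

lemma phase2 (xs : List Int) : ∀ (k : Nat) (acc s : List Int),
    acc.length = k → s.length = (xs.filter (fun x => decide (x > 0))).length →
    (pairsNP xs (k : Int)).foldl (fun a p => PySem.List.insert a p.1 p.2) (acc ++ s)
      = acc ++ altFill xs s := by
  induction xs with
  | nil =>
    intro k acc s _ hs
    have : s = [] := List.eq_nil_of_length_eq_zero (by simpa using hs)
    simp [pairsNP, altFill, this]
  | cons x xs ih =>
    intro k acc s hacc hs
    by_cases hx : x > 0
    · simp only [List.filter_cons, decide_eq_true hx, if_true, List.length_cons] at hs
      cases s with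
      | nil => simp at hs
      | cons p s' =>
        simp only [List.length_cons] at hs
        have hs' : s'.length = (xs.filter (fun x => decide (x > 0))).length := by omega
        simp only [pairsNP, hx, if_pos, altFill]
        have h1 : ((k : Int) + 1) = ((k + 1 : Nat) : Int) := by push_cast; ring
        have h2 : acc ++ p :: s' = (acc ++ [p]) ++ s' := by simp
        rw [h2, h1, ih (k + 1) (acc ++ [p]) s' (by simp [hacc]) hs']
        simp
    · simp only [List.filter_cons, decide_eq_false hx] at hs
      simp only [pairsNP, hx, if_false, altFill, List.foldl_cons]
      have hins : PySem.List.insert (acc ++ s) (k : Int) x = (acc ++ [x]) ++ s := by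
        rw [PySem.List.insert_natCast _ _ _ (by rw [List.length_append, hacc]; omega)]
        rw [List.take_left' hacc, List.drop_left' hacc]
        simp
      have h1 : ((k : Int) + 1) = ((k + 1 : Nat) : Int) := by push_cast; ring
      rw [hins, h1, ih (k + 1) (acc ++ [x]) s (by simp [hacc]) hs]
      simp

-- ===== VERDICT (by name: the statement is the Claim_ definition above) =====
theorem pos_neg_sort_spec : Claim_equal_pos_neg_sort := by
  intro lst _
  unfold Spec_pos_neg_sort pos_neg_sort pos_neg_sort_alt
  have h0 : ([] : List Int) = PySem.List.sorted [] (fun x => x) false := rfl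
  rw [h0, phase1 lst 0 [] PySem.Dict.empty]
  dsimp only
  rw [items_dictNP lst 0 PySem.Dict.empty (by simp [PySem.Dict.keys_empty])]
  have hie : PySem.Dict.empty.items = ([] : List (Int × Int)) := rfl
  rw [hie, List.nil_append, List.nil_append]
  have hp2 := phase2 lst 0 []
      (PySem.List.sorted (lst.filter (fun x => decide (x > 0))) (fun x => x) false) rfl
      (PySem.List.length_sorted _ _ _)
  simpa using hp2
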